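-- pv_equiv track=rewrite | github.com/minstone1010/Programmers | 프로그래머스/1/134240. 푸드 파이트 대회/푸드 파이트 대회.py | solution
-- ===== SOURCE A (Python) =====
-- def solution(food):
--     answer = ''
--     half = []
--     for i in range(len(food)):
--         half.append(food[i]//2)
--
--     for i in range(1, len(half)):
--             for j in range(half[i]):
--                 answer += str(i)
--
--     answer += "0"
--
--     for i in range(len(half)-1,0,-1):
--             for j in range(half[i]):
--                 answer += str(i)
--     return answer
-- ===== SOURCE B (Python) =====
-- def solution(food):
--     parts = ["0"]
--     for i in range(len(food) - 1, 0, -1):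
--         piece = str(i) * (food[i] // 2)
--         parts = [piece] + parts + [piece]
--     return ''.join(parts)
-- ===== Notes on version B (the rewrite author's own statement) =====
-- stated objective: simpler
-- what changed: Builds the palindrome by wrapping the center '0' outward in one backward loop (parts = [piece] + parts + [piece], joined once), instead of A's staged construction of a left half, center, and separately looped mirrored right half.
import Mathlib
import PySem

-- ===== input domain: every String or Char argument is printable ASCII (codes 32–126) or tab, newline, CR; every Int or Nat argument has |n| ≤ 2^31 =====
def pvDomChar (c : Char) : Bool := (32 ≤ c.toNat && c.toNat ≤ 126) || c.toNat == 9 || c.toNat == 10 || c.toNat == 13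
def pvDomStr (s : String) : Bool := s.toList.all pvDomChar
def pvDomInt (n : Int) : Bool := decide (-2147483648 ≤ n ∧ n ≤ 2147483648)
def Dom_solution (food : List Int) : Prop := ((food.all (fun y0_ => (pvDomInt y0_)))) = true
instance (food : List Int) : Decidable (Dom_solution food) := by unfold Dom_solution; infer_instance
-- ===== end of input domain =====

-- B wraps the center '0' outward in one backward loop over a piece list joined once,
-- instead of A's staged left half + center + second mirrored loop; objective: simpler.


-- ===== PORT A =====
-- strings are ported as List Char (PySem.Chars) and converted once at the return
def solution (food : List Int) : String :=
  let half : List Int :=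
    (PySem.List.pyRange 0 food.length 1).foldl
      (fun h i => h ++ [PySem.Int.floordiv (PySem.List.pyGetD food i 0) 2]) []
  let answer : List Char :=
    (PySem.List.pyRange 1 half.length 1).foldl
      (fun ans i =>
        (PySem.List.pyRange 0 (PySem.List.pyGetD half i 0) 1).foldl
          (fun a _ => a ++ PySem.Int.toChars i) ans) []
  let answer := answer ++ ['0']
  let answer :=
    (PySem.List.pyRange ((half.length : Int) - 1) 0 (-1)).foldl
      (fun ans i =>
        (PySem.List.pyRange 0 (PySem.List.pyGetD half i 0) 1).foldl
          (fun a _ => a ++ PySem.Int.toChars i) ans) answer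
  String.ofList answer

-- ===== PORT B =====
def solution_alt (food : List Int) : String :=
  let parts : List (List Char) :=
    (PySem.List.pyRange ((food.length : Int) - 1) 0 (-1)).foldl
      (fun ps i =>
        let piece := PySem.List.pyRepeat (PySem.Int.toChars i)
                       (PySem.Int.floordiv (PySem.List.pyGetD food i 0) 2)
        [piece] ++ ps ++ [piece]) [['0']]
  String.ofList (PySem.Chars.join [] parts)

-- ===== PRECONDITION & SPEC =====
def Spec_solution (food : List Int) (out : String) : Prop := out = solution_alt food
instance (food : List Int) (out : String) : Decidable (Spec_solution food out) := by unfold Spec_solution; infer_instance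

-- ===== CLAIM (what is proved, stated in full; the proofs are below) =====
def Claim_equal_solution : Prop := ∀ (food : List Int), Dom_solution food → Spec_solution food (solution food)

-- ===== LEMMAS AND PROOFS =====

-- A's inner char-append loop over a range produces the repeated piece
theorem inner_loop_eq (t : List Char) (k : Int) (a : List Char) :
    (PySem.List.pyRange 0 k 1).foldl (fun x (_ : Int) => x ++ t) a
      = a ++ PySem.List.pyRepeat t k := by
  have h : ∀ (l : List Int) (a : List Char),
      l.foldl (fun x (_ : Int) => x ++ t) a
        = a ++ (List.replicate l.length t).flatten := by
    intro l
    induction l with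
    | nil => simp
    | cons x xs ih => intro a; simp [List.foldl_cons, ih, List.replicate_succ]
  rw [h, PySem.List.pyRepeat]
  have : (PySem.List.pyRange 0 k 1).length = k.toNat := by
    simpa using PySem.List.length_pyRange_one 0 k
  rw [this]

-- A's outer loop over any index list appends the flattened mapped pieces
theorem outer_loop_eq (g : Int → Int) (r : List Int) (a : List Char) :
    r.foldl (fun ans i =>
        (PySem.List.pyRange 0 (g i) 1).foldl
          (fun x (_ : Int) => x ++ PySem.Int.toChars i) ans) a
      = a ++ (r.map (fun i => PySem.List.pyRepeat (PySem.Int.toChars i) (g i))).flatten := by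
  induction r generalizing a with
  | nil => simp
  | cons x xs ih =>
    simp only [List.foldl_cons, List.map_cons, List.flatten_cons]
    rw [inner_loop_eq, ih, List.append_assoc]

-- ''.join is flatten
theorem joinNil_eq_flatten (l : List (List Char)) :
    PySem.Chars.join [] l = l.flatten := by
  induction l with
  | nil => rfl
  | cons x xs ih =>
    cases xs with
    | nil => simp [PySem.Chars.join, List.intercalate]
    | cons y ys =>
      rw [PySem.Chars.join_cons_cons, ih]
      simp

-- B's wrapping loop: [piece] ++ … ++ [piece], unwound over any index list
theorem wrap_loop_eq (p : Int → List Char) (r : List Int) (c : List (List Char)) :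
    r.foldl (fun ps i => [p i] ++ ps ++ [p i]) c
      = r.reverse.map p ++ c ++ r.map p := by
  induction r generalizing c with
  | nil => simp
  | cons x xs ih =>
    simp only [List.foldl_cons, List.reverse_cons, List.map_append, List.map_cons, List.map_nil]
    rw [ih]
    simp [List.append_assoc]

-- half = food.map (·//2)
theorem half_eq (food : List Int) :
    (PySem.List.pyRange 0 food.length 1).foldl
      (fun h i => h ++ [PySem.Int.floordiv (PySem.List.pyGetD food i 0) 2]) []
    = food.map (fun v => PySem.Int.floordiv v 2) := by
  have := PySem.List.foldl_pyRange_zero_pyGetD food 0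
      (fun (h : List Int) v => h ++ [PySem.Int.floordiv v 2]) []
  simp only [PySem.List.len_eq] at this
  rw [this, PySem.List.foldl_append_singleton_eq_map, List.nil_append]

-- reading half at i is food[i]//2 (any index, same default path)
theorem pyGetD_half (food : List Int) (i : Int) :
    PySem.List.pyGetD (food.map (fun v => PySem.Int.floordiv v 2)) i 0
      = PySem.Int.floordiv (PySem.List.pyGetD food i 0) 2 := by
  exact PySem.List.pyGetD_map (fun v => PySem.Int.floordiv v 2) food i 0

-- ===== VERDICT (by name: the statement is the Claim_ definition above) =====
theorem solution_spec : Claim_equal_solution := by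
  intro food _
  unfold Spec_solution solution solution_alt
  simp only [half_eq]
  set h := food.map (fun v => PySem.Int.floordiv v 2) with hh
  have hlen : h.length = food.length := by simp [hh]
  set g : Int → Int := fun i => PySem.Int.floordiv (PySem.List.pyGetD food i 0) 2 with hg
  have hget : ∀ i : Int, PySem.List.pyGetD h i 0 = g i := by
    intro i; rw [hh, hg]; exact pyGetD_half food i
  have hback : PySem.List.pyRange ((food.length : Int) - 1) 0 (-1)
      = (PySem.List.pyRange 1 (food.length : Int) 1).reverse := by
    rw [PySem.List.pyRange_neg_one_eq_reverse]
    norm_num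
  simp only [hget, hlen]
  rw [outer_loop_eq, outer_loop_eq,
      wrap_loop_eq (fun i => PySem.List.pyRepeat (PySem.Int.toChars i) (g i)),
      hback, joinNil_eq_flatten]
  simp [List.map_reverse]
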